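-- pv_equiv track=rewrite | github.com/fip-lab/DESIGN | baseline/dataset_ks_absa.py | _specific_dish_or_drink
-- ===== SOURCE A (Python) =====
-- def _specific_dish_or_drink(user_query, vocab_list):
--     is_specific_dish_or_drink = False
--     matched_entities = []
--     for word in vocab_list:
--         # 直接匹配
--         if word.lower() in user_query.lower() and word not in matched_entities:
--             matched_entities.append(word)
--     if matched_entities:
--         is_specific_dish_or_drink = True
--     return is_specific_dish_or_drink, matched_entities
-- ===== SOURCE B (Python) =====
-- def _specific_dish_or_drink(user_query, vocab_list):
--     q = user_query.lower()
--     lengths = {len(w) for w in vocab_list}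
--     subs = {q[i:i + L] for L in lengths for i in range(len(q) - L + 1)}
--     matched_entities = [w for w in dict.fromkeys(vocab_list) if w.lower() in subs]
--     return bool(matched_entities), matched_entities
-- ===== Notes on version B (the rewrite author's own statement) =====
-- stated objective: faster
-- what changed: B precomputes a hash set of all substrings of the lowered query whose length occurs among the vocab words, then selects the deduplicated vocab words by a single O(1)-amortized set lookup each, instead of A's per-word substring search over the re-lowered query with a linear scan of the growing result list for deduplication.
import Mathlib
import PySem

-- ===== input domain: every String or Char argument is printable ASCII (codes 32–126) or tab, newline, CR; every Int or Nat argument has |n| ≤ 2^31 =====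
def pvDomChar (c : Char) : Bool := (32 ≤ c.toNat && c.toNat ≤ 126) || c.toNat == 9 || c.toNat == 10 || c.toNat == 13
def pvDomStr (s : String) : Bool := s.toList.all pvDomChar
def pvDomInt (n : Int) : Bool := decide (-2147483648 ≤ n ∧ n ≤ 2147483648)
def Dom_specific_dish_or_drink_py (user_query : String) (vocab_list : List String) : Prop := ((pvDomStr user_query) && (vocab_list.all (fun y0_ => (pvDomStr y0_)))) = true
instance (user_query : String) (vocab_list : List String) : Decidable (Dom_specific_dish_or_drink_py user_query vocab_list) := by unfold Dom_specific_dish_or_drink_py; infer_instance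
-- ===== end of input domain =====

-- B precomputes the set of all query substrings whose length occurs in the vocabulary, then keeps
-- each distinct vocab word by a plain set lookup instead of A's per-word substring search over the
-- query with a scan of the growing result list (objective: alternative).

-- ===== PORT A =====
def specific_dish_or_drink_py (user_query : String) (vocab_list : List String) : Bool × List String :=
  -- is_specific_dish_or_drink = False; matched_entities = []; for word in vocab_list: …
  let matched_entities : List String :=
    vocab_list.foldl
      (fun acc word =>
        if PySem.Str.isIn (PySem.Str.lower word) (PySem.Str.lower user_query) && !(acc.contains word)
        then acc ++ [word] else acc)
      []
  let is_specific_dish_or_drink : Bool := if matched_entities.isEmpty then false else true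
  (is_specific_dish_or_drink, matched_entities)

-- ===== PORT B =====
def specific_dish_or_drink_py_alt (user_query : String) (vocab_list : List String) : Bool × List String :=
  let q := (PySem.Str.lower user_query).toList
  -- lengths = {len(w) for w in vocab_list}
  let lengths : List Nat := PySem.Set.ofList (vocab_list.map (fun w => w.toList.length))
  -- subs = {q[i:i+L] for L in lengths for i in range(len(q) - L + 1)}
  -- q[i:i+L] with natural i, L is (q.drop i).take L (PySem.List.slice_natCast_add is exact here);
  -- Python's range(len(q) - L + 1) enumerates 0 … clamped to empty when L > len(q): exactly List.range (q.length + 1 - L) in Nat arithmetic.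
  let subs : List (List Char) :=
    PySem.Set.ofList (lengths.flatMap (fun L => (List.range (q.length + 1 - L)).map (fun i => (q.drop i).take L)))
  let matched_entities :=
    (PySem.List.dedup vocab_list).filter (fun w => subs.contains (PySem.Str.lower w).toList)
  (!matched_entities.isEmpty, matched_entities)

-- ===== PRECONDITION & SPEC =====
def Spec_specific_dish_or_drink_py (user_query : String) (vocab_list : List String) (out : Bool × List String) : Prop := out = specific_dish_or_drink_py_alt user_query vocab_list
instance (user_query : String) (vocab_list : List String) (out : Bool × List String) : Decidable (Spec_specific_dish_or_drink_py user_query vocab_list out) := by unfold Spec_specific_dish_or_drink_py; infer_instance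

-- ===== CLAIM (what is proved, stated in full; the proofs are below) =====
def Claim_equal_specific_dish_or_drink_py : Prop := ∀ (user_query : String) (vocab_list : List String), Dom_specific_dish_or_drink_py user_query vocab_list → Spec_specific_dish_or_drink_py user_query vocab_list (specific_dish_or_drink_py user_query vocab_list)

-- ===== LEMMAS AND PROOFS =====

-- A's loop step equals "Set.add when the word matches, else skip".
theorem pvStepEqSetAdd (p : String → Bool) (acc : List String) (word : String) :
    (if p word && !(acc.contains word) then acc ++ [word] else acc)
      = (if p word then PySem.Set.add acc word else acc) := by
  by_cases hp : p word = true
  · by_cases hc : acc.contains word = true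
    · simp [hp, PySem.Set.add, PySem.Set.contains]
    · simp [hp, PySem.Set.add, PySem.Set.contains]
  · simp [hp]

-- filter commutes with the Set.add fold (hence with dedup).
theorem pvFilterFoldlAdd (p : String → Bool) (xs : List String) (acc : List String) :
    ((xs.foldl PySem.Set.add acc).filter p) = (xs.filter p).foldl PySem.Set.add (acc.filter p) := by
  induction xs generalizing acc with
  | nil => simp
  | cons x t ih =>
    simp only [List.foldl_cons]
    rw [ih]
    by_cases hp : p x = true
    · rw [List.filter_cons_of_pos hp, List.foldl_cons]
      congr 1
      by_cases hm : x ∈ acc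
      · have hm' : x ∈ acc.filter p := List.mem_filter.mpr ⟨hm, hp⟩
        simp [PySem.Set.add, PySem.Set.contains, hm, hm']
      · have hm' : x ∉ acc.filter p := fun h => hm (List.mem_filter.mp h).1
        simp [PySem.Set.add, PySem.Set.contains, hm, hm', List.filter_append, hp]
    · rw [List.filter_cons_of_neg (by simpa using hp)]
      congr 1
      by_cases hm : x ∈ acc
      · simp [PySem.Set.add, PySem.Set.contains, hm]
      · simp [PySem.Set.add, PySem.Set.contains, hm, List.filter_append, hp]

-- A's loop result is the dedup'd vocabulary filtered by the match predicate.
theorem pvMatchedEq (p : String → Bool) (xs : List String) :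
    xs.foldl (fun acc word => if p word && !(acc.contains word) then acc ++ [word] else acc) []
      = (PySem.List.dedup xs).filter p := by
  have h1 : xs.foldl (fun acc word => if p word && !(acc.contains word) then acc ++ [word] else acc) []
      = xs.foldl (fun acc word => if p word then PySem.Set.add acc word else acc) [] := by
    apply PySem.List.foldl_congr_mem
    intro acc word _
    exact pvStepEqSetAdd p acc word
  rw [h1, PySem.List.foldl_if_eq_foldl_filter]
  have := pvFilterFoldlAdd p xs []
  simp only [List.filter_nil] at this
  rw [PySem.List.dedup_eq_ofList, PySem.Set.ofList_eq_foldl, this]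

-- Membership in B's substring pool is exactly "is an infix of the query", provided the length occurs.
theorem pvMemSubsIff (q wl : List Char) (lengths : List Nat) (hl : wl.length ∈ lengths) :
    (wl ∈ lengths.flatMap (fun L => (List.range (q.length + 1 - L)).map (fun i => (q.drop i).take L)))
      ↔ PySem.Chars.isIn wl q = true := by
  rw [← PySem.Chars.exists_prefix_drop_iff_isIn]
  constructor
  · rintro h
    rcases List.mem_flatMap.mp h with ⟨L, _, hm⟩
    rcases List.mem_map.mp hm with ⟨i, _, rfl⟩
    exact ⟨i, List.take_prefix _ _⟩
  · rintro ⟨j, hp⟩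
    have heq : wl = (q.drop j).take wl.length := List.prefix_iff_eq_take.mp hp
    have hle : wl.length ≤ q.length - j := by
      have := hp.length_le
      simpa using this
    by_cases h0 : wl.length = 0
    · have : wl = [] := List.length_eq_zero_iff.mp h0
      apply List.mem_flatMap.mpr
      exact ⟨wl.length, hl, List.mem_map.mpr ⟨0, by simp [h0], by simp [this]⟩⟩
    · have hj : j < q.length + 1 - wl.length := by omega
      apply List.mem_flatMap.mpr
      exact ⟨wl.length, hl, List.mem_map.mpr ⟨j, List.mem_range.mpr hj, heq.symm⟩⟩

-- the returned pair: A's if-flag is Bool negation of isEmpty.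
theorem pvPairShape (m : List String) : ((if m.isEmpty then false else true : Bool), m) = (!m.isEmpty, m) := by
  cases m <;> rfl

-- lowering a string keeps its length.
theorem pvLowerLen (w : String) : (PySem.Str.lower w).toList.length = w.toList.length := by
  simp [PySem.Str.toList_lower, PySem.Chars.lower]

-- ===== VERDICT (by name: the statement is the Claim_ definition above) =====
theorem specific_dish_or_drink_py_spec : Claim_equal_specific_dish_or_drink_py := by
  intro user_query vocab_list _
  unfold Spec_specific_dish_or_drink_py specific_dish_or_drink_py specific_dish_or_drink_py_alt
  simp only
  rw [pvMatchedEq (fun w => PySem.Str.isIn (PySem.Str.lower w) (PySem.Str.lower user_query))]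
  have hfil :
      (PySem.List.dedup vocab_list).filter
        (fun w => PySem.Str.isIn (PySem.Str.lower w) (PySem.Str.lower user_query))
      = (PySem.List.dedup vocab_list).filter
        (fun w => (PySem.Set.ofList
            ((PySem.Set.ofList (vocab_list.map (fun w => w.toList.length)) : List Nat).flatMap
              (fun L => (List.range ((PySem.Str.lower user_query).toList.length + 1 - L)).map
                (fun i => (((PySem.Str.lower user_query).toList).drop i).take L)))).contains
            (PySem.Str.lower w).toList) := by
    apply List.filter_congr
    intro w hw
    have hwv : w ∈ vocab_list := (PySem.List.mem_dedup _ _).mp hw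
    have hl : (PySem.Str.lower w).toList.length
        ∈ (PySem.Set.ofList (vocab_list.map (fun w => w.toList.length)) : List Nat) := by
      rw [PySem.Set.mem_ofList, pvLowerLen]
      exact List.mem_map.mpr ⟨w, hwv, rfl⟩
    have := pvMemSubsIff (PySem.Str.lower user_query).toList (PySem.Str.lower w).toList _ hl
    rw [← PySem.Set.mem_ofList] at this
    have hbridge : PySem.Str.isIn (PySem.Str.lower w) (PySem.Str.lower user_query)
        = PySem.Chars.isIn (PySem.Str.lower w).toList (PySem.Str.lower user_query).toList := by
      simp [pysem]
    rw [hbridge, Bool.eq_iff_iff, ← this]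
    simp
  rw [hfil]
  exact pvPairShape _
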